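-- pv_equiv track=rewrite | github.com/IanSkapin/Python | zero_length_compression.py | solution
-- ===== SOURCE A (Python) =====
-- def compress(S):
--     comp = []
--     e_old = S[0]
--     cnt = 0
--     for e in S:
--         if e != e_old:
--             comp.append([cnt, e_old])
--             e_old = e
--             cnt = 1
--         else:
--             cnt += 1
--     comp.append([cnt, e_old])
--     return comp
--
-- def length_compressed(comp):
--     length = 0
--     for cnt, e in comp:
--         length += 1 + (len(str(cnt)) if cnt > 1 else 0)
--     return length
--
-- def fix_compressed(comp, remove, K):
--     updated = []
--     for idx, (cnt, e) in enumerate(comp):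
--         if idx == remove:
--             K -= cnt
--             if K > 0:
--                 remove += 1
--             elif K < 0:
--                 if updated and updated[-1][1] == e:
--                     updated[-1][0] += -K
--                 else:
--                     updated.append([-K, e])
--             continue
--         if updated and updated[-1][1] == e:
--             updated[-1][0] += cnt
--         else:
--             updated.append([cnt, e])
--     return updated
--
-- def solution(S, K):
--     # write your code in Python 3.6
--     s = compress(S)
--     shortest = len(S)
--     for idx, (cnt, e) in enumerate(s):
--         if cnt <= K or len(str(cnt)) > len(str(cnt - K)):
--             ss = fix_compressed(s, idx, K)
--             lss = length_compressed(ss)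
--             if shortest > lss:
--                 shortest = lss
--     return shortest
-- ===== SOURCE B (Python) =====
-- def solution(S, K):
--     # build runs (cnt, ch) by merging each char into the last run
--     runs = []
--     for ch in S:
--         if runs and runs[-1][1] == ch:
--             runs[-1] = (runs[-1][0] + 1, ch)
--         else:
--             runs.append((1, ch))
--
--     def f(c):
--         return 1 + (len(str(c)) if c > 1 else 0)
--
--     n = len(runs)
--     # lp[i] = compressed length of runs[:i]
--     lp = [0] * (n + 1)
--     for i in range(n):
--         lp[i + 1] = lp[i] + f(runs[i][0])
--     total = lp[n]
--
--     shortest = len(S)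
--     for idx in range(n):
--         cnt = runs[idx][0]
--         if not (cnt <= K or len(str(cnt)) > len(str(cnt - K))):
--             continue
--         # walk the runs consumed by deleting K chars starting at run idx
--         k = K
--         j = idx
--         while j < n and k - runs[j][0] > 0:
--             k -= runs[j][0]
--             j += 1
--         if j == n:
--             lss = lp[idx]
--         else:
--             rem = runs[j][0] - k
--             if rem > 0:
--                 kept, rest = (rem, runs[j][1]), j + 1
--             elif j + 1 < n:
--                 kept, rest = (runs[j + 1][0], runs[j + 1][1]), j + 2
--             else:
--                 kept, rest = None, j + 1
--             suffix = total - lp[rest]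
--             if kept is None:
--                 lss = lp[idx]
--             elif idx > 0 and runs[idx - 1][1] == kept[1]:
--                 lss = lp[idx - 1] + f(runs[idx - 1][0] + kept[0]) + suffix
--             else:
--                 lss = lp[idx] + f(kept[0]) + suffix
--         if shortest > lss:
--             shortest = lss
--     return shortest
-- ===== Notes on version B (the rewrite author's own statement) =====
-- stated objective: faster
-- what changed: B precomputes prefix sums of per-run compressed-length contributions once and, for each candidate run, only walks the runs actually consumed by the K-character deletion and applies an O(1) boundary-merge fixup, instead of rebuilding the whole merged run list and re-measuring its length for every candidate as A does.
import Mathlib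
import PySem

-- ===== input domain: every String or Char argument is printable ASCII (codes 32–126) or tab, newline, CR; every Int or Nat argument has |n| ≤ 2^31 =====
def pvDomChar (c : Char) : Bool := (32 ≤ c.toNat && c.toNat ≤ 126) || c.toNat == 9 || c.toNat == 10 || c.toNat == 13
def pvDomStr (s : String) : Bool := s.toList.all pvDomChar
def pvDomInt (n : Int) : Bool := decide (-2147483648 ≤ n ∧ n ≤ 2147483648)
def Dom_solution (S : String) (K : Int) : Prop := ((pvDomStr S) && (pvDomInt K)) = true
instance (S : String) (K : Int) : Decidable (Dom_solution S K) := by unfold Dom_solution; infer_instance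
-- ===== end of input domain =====

-- B replaces A's per-candidate rebuild-and-remeasure of the whole run list by precomputed
-- prefix length sums, a walk over only the consumed runs, and an O(1) boundary-merge fixup (faster).

-- ===== PORT A =====
-- len(str(c))
def pvDig (c : Int) : Int := ((PySem.Int.toChars c).length : Int)

-- the for-loop of compress, state (comp, e_old, cnt), with the trailing append on exit
def compressGo : List Char → List (Int × Char) → Char → Int → List (Int × Char)
  | [], comp, eold, cnt => comp ++ [(cnt, eold)]
  | e :: rest, comp, eold, cnt =>
    if e ≠ eold then compressGo rest (comp ++ [(cnt, eold)]) e 1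
    else compressGo rest comp eold (cnt + 1)

def compress (l : List Char) : List (Int × Char) :=
  match l with
  | [] => []          -- Python raises IndexError (S[0]) here; excluded by Pre_solution
  | c :: _ => compressGo l [] c 0

def lengthCompressed (comp : List (Int × Char)) : Int :=
  comp.foldl (fun acc p => acc + 1 + (if p.1 > 1 then pvDig p.1 else 0)) 0

-- 'if updated and updated[-1][1] == e: updated[-1][0] += cnt else: updated.append([cnt, e])'
def pushMerge (updated : List (Int × Char)) (cnt : Int) (e : Char) : List (Int × Char) :=
  match updated.getLast? with
  | some (c0, e0) => if e0 = e then updated.dropLast ++ [(c0 + cnt, e0)] else updated ++ [(cnt, e)]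
  | none => [(cnt, e)]

-- the enumerate-for-loop of fix_compressed, state (updated, remove, K), idx the running index
def fixGo : List (Int × Char) → List (Int × Char) → Nat → Int → Nat → List (Int × Char)
  | [], updated, _, _, _ => updated
  | (cnt, e) :: rest, updated, remove, K, idx =>
    if idx = remove then
      let K' := K - cnt
      if K' > 0 then fixGo rest updated (remove + 1) K' (idx + 1)
      else if K' < 0 then fixGo rest (pushMerge updated (-K') e) remove K' (idx + 1)
      else fixGo rest updated remove K' (idx + 1)
    else fixGo rest (pushMerge updated cnt e) remove K (idx + 1)

def fixCompressed (comp : List (Int × Char)) (remove : Nat) (K : Int) : List (Int × Char) :=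
  fixGo comp [] remove K 0

-- the main enumerate-for-loop of solution, accumulating shortest
def solGoA (s : List (Int × Char)) (K : Int) : List (Int × Char) → Nat → Int → Int
  | [], _, shortest => shortest
  | (cnt, _) :: rest, idx, shortest =>
    let shortest' :=
      if cnt ≤ K ∨ pvDig cnt > pvDig (cnt - K) then
        let lss := lengthCompressed (fixCompressed s idx K)
        if shortest > lss then lss else shortest
      else shortest
    solGoA s K rest (idx + 1) shortest'

def solution (S : String) (K : Int) : Int :=
  let s := compress S.toList
  solGoA s K s 0 (PySem.Str.len S)

-- ===== PORT B =====
def fB (c : Int) : Int := 1 + (if c > 1 then pvDig c else 0)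

-- merge one character into the last run, or start a new run
def addRun (runs : List (Int × Char)) (ch : Char) : List (Int × Char) :=
  match runs.getLast? with
  | some (c, e) => if e = ch then runs.dropLast ++ [(c + 1, ch)] else runs ++ [(1, ch)]
  | none => [(1, ch)]

def runsOf (l : List Char) : List (Int × Char) := l.foldl addRun []

-- lp[i] = compressed length of runs[:i]  (the lp-building loop is a scan)
def prefLens (runs : List (Int × Char)) : List Int :=
  runs.scanl (fun a p => a + fB p.1) 0

-- the while loop: walk runs from j while more than the current run remains to delete
def consumeGo : List (Int × Char) → Nat → Int → Nat × Int
  | [], j, k => (j, k)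
  | (c, _) :: rest, j, k => if k - c > 0 then consumeGo rest (j + 1) (k - c) else (j, k)

-- for idx in range(n): candidate test, consume walk, O(1) length formula
def solGoB (runs : List (Int × Char)) (lp : List Int) (total K : Int) :
    List (Int × Char) → Nat → Int → Int
  | [], _, shortest => shortest
  | (cnt, _) :: rest, idx, shortest =>
    if ¬ (cnt ≤ K ∨ pvDig cnt > pvDig (cnt - K)) then
      solGoB runs lp total K rest (idx + 1) shortest
    else
      let jk := consumeGo (runs.drop idx) idx K
      let lss :=
        if jk.1 = runs.length then lp.getD idx 0
        else
          let rj := runs.getD jk.1 (0, ' ')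
          let rem := rj.1 - jk.2
          let keptRest : Option (Int × Char) × Nat :=
            if rem > 0 then (some (rem, rj.2), jk.1 + 1)
            else if jk.1 + 1 < runs.length then (some (runs.getD (jk.1 + 1) (0, ' ')), jk.1 + 2)
            else (none, jk.1 + 1)
          let suffix := total - lp.getD keptRest.2 0
          match keptRest.1 with
          | none => lp.getD idx 0
          | some kp =>
            if 0 < idx ∧ (runs.getD (idx - 1) (0, ' ')).2 = kp.2 then
              lp.getD (idx - 1) 0 + fB ((runs.getD (idx - 1) (0, ' ')).1 + kp.1) + suffix
            else lp.getD idx 0 + fB kp.1 + suffix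
      solGoB runs lp total K rest (idx + 1) (if shortest > lss then lss else shortest)

def solution_alt (S : String) (K : Int) : Int :=
  let runs := runsOf S.toList
  let lp := prefLens runs
  let total := lp.getD runs.length 0
  solGoB runs lp total K runs 0 (PySem.Str.len S)

-- ===== PRECONDITION & SPEC =====
-- A reads S[0] before anything else, so it raises IndexError exactly on the empty string.
def Pre_solution (S : String) (K : Int) : Prop := S ≠ ""
instance (S : String) (K : Int) : Decidable (Pre_solution S K) := by unfold Pre_solution; infer_instance
def pvWitness_solution : String × Int := ("aabcccc", 2)

def Spec_solution (S : String) (K : Int) (out : Int) : Prop := out = solution_alt S K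
instance (S : String) (K : Int) (out : Int) : Decidable (Spec_solution S K out) := by unfold Spec_solution; infer_instance

-- ===== CLAIM (what is proved, stated in full; the proofs are below) =====
def Claim_equal_solution : Prop := ∀ (S : String) (K : Int), Dom_solution S K → Pre_solution S K → Spec_solution S K (solution S K)
-- ===== LEMMAS AND PROOFS =====

-- proof-side abbreviations
def pmF (u : List (Int × Char)) (p : Int × Char) : List (Int × Char) := pushMerge u p.1 p.2

def AdjOk (runs : List (Int × Char)) : Prop :=
  List.IsChain (fun p q => p.2 ≠ q.2) runs

-- the kept runs after deleting k characters from the front of the list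
def consume : Int → List (Int × Char) → List (Int × Char)
  | _, [] => []
  | k, (c, e) :: rest =>
    if k - c > 0 then consume (k - c) rest
    else if k - c < 0 then (c - k, e) :: rest else rest

def cFinish : List (Int × Char) → Int → List (Int × Char)
  | [], _ => []
  | (c, e) :: rest, k => if k - c < 0 then (c - k, e) :: rest else rest

theorem compressGo_eq_foldl (l : List Char) :
    ∀ comp eold cnt, compressGo l comp eold cnt = l.foldl addRun (comp ++ [(cnt, eold)]) := by
  induction l with
  | nil => intro comp eold cnt; simp [compressGo]
  | cons e rest ih =>
    intro comp eold cnt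
    by_cases h : e = eold
    · subst h
      simp only [compressGo, ne_eq, not_true_eq_false, if_false, List.foldl_cons,
        addRun, List.getLast?_concat, List.dropLast_concat, ih, if_true]
    · simp only [compressGo, ne_eq, if_pos h, List.foldl_cons, addRun, List.getLast?_concat,
        List.dropLast_concat, if_neg (fun he => h (Eq.symm he)), ih, List.append_assoc,
        List.singleton_append]

theorem compress_eq_runsOf (l : List Char) (h : l ≠ []) : compress l = runsOf l := by
  match l with
  | c :: rest =>
    show compressGo (c :: rest) [] c 0 = runsOf (c :: rest)
    rw [compressGo_eq_foldl]
    simp [runsOf, addRun]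

theorem pushMerge_no_merge (u : List (Int × Char)) (c : Int) (e : Char)
    (h : ∀ a ∈ u.getLast?, a.2 ≠ e) : pushMerge u c e = u ++ [(c, e)] := by
  unfold pushMerge
  cases hu : u.getLast? with
  | none => simp [List.getLast?_eq_none_iff.mp hu]
  | some a =>
    obtain ⟨c0, e0⟩ := a
    have := h _ hu
    simp only at this
    simp [this]

theorem adjOk_addRun (u : List (Int × Char)) (ch : Char) (h : AdjOk u) : AdjOk (addRun u ch) := by
  unfold AdjOk at *
  cases hu : u.getLast? with
  | none =>
    have hred : addRun u ch = [(1, ch)] := by unfold addRun; rw [hu]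
    rw [hred]; simp
  | some a =>
    obtain ⟨c0, e0⟩ := a
    have hne : u ≠ [] := by intro h0; simp [h0] at hu
    have hu' : u.dropLast ++ [(c0, e0)] = u := by
      have := List.dropLast_concat_getLast hne
      rwa [List.getLast_eq_iff_getLast?_eq_some hne |>.mpr hu] at this
    have hred : addRun u ch
        = if e0 = ch then u.dropLast ++ [(c0 + 1, ch)] else u ++ [(1, ch)] := by
      unfold addRun; rw [hu]
    rw [hred]
    by_cases he : e0 = ch
    · subst he
      rw [if_pos rfl]
      rw [← hu'] at h
      rw [List.isChain_append] at h ⊢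
      refine ⟨h.1, by simp, ?_⟩
      intro x hx y hy
      have := h.2.2 x hx (c0, e0) (by simp)
      simp at hy
      subst hy
      simpa using this
    · rw [if_neg he, List.isChain_append]
      refine ⟨h, by simp, ?_⟩
      intro x hx y hy
      simp at hy
      subst hy
      rw [hu] at hx
      simp at hx
      subst hx
      simpa using he

theorem adjOk_runsOf (l : List Char) : AdjOk (runsOf l) := by
  have gen : ∀ (l : List Char) (u : List (Int × Char)), AdjOk u → AdjOk (l.foldl addRun u) := by
    intro l
    induction l with
    | nil => intro u h; exact h
    | cons c rest ih => intro u h; exact ih _ (adjOk_addRun u c h)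
  exact gen l [] (by simp [AdjOk])

theorem foldl_pmF_no_merge (M : List (Int × Char)) :
    ∀ u, List.IsChain (fun p q => p.2 ≠ q.2) M →
    (∀ a ∈ u.getLast?, ∀ b ∈ M.head?, a.2 ≠ b.2) →
    M.foldl pmF u = u ++ M := by
  induction M with
  | nil => intro u _ _; simp
  | cons m M' ih =>
    intro u hM hb
    have h1 : pmF u m = u ++ [m] := by
      refine pushMerge_no_merge u m.1 m.2 (fun a ha => hb a ha m (by simp))
    rw [List.foldl_cons, h1, ih (u ++ [m]) ((List.isChain_cons.mp hM).2) ?_]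
    · simp
    · intro a ha b hbmem
      rw [List.getLast?_concat] at ha
      simp at ha
      subst ha
      exact (List.isChain_cons.mp hM).1 b hbmem

theorem foldl_pmF_merge (u₀ M' : List (Int × Char)) (c0 c1 : Int) (e0 : Char)
    (hM : List.IsChain (fun p q => p.2 ≠ q.2) ((c1, e0) :: M')) :
    ((c1, e0) :: M').foldl pmF (u₀ ++ [(c0, e0)]) = u₀ ++ [(c0 + c1, e0)] ++ M' := by
  rw [List.foldl_cons]
  have h1 : pmF (u₀ ++ [(c0, e0)]) (c1, e0) = u₀ ++ [(c0 + c1, e0)] := by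
    simp [pmF, pushMerge]
  have hb : ∀ a ∈ (u₀ ++ [(c0 + c1, e0)]).getLast?, ∀ b ∈ M'.head?, a.2 ≠ b.2 := by
    intro a ha b hbmem
    rw [List.getLast?_concat] at ha
    simp at ha
    subst ha
    exact (List.isChain_cons.mp hM).1 b hbmem
  rw [h1, foldl_pmF_no_merge M' _ ((List.isChain_cons.mp hM).2) hb]

theorem fixGo_pre (P : List (Int × Char)) :
    ∀ L u r K i, i + P.length ≤ r →
    fixGo (P ++ L) u r K i = fixGo L (P.foldl pmF u) r K (i + P.length) := by
  induction P with
  | nil => intro L u r K i _; simp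
  | cons p P' ih =>
    intro L u r K i h
    obtain ⟨c, e⟩ := p
    simp only [List.cons_append, fixGo, if_neg (by simp at h ⊢; omega : ¬ i = r)]
    rw [ih L (pushMerge u c e) r K (i + 1) (by simp at h ⊢; omega)]
    have h2 : i + 1 + P'.length = i + (P'.length + 1) := by omega
    rw [h2]
    rfl

theorem fixGo_post (L : List (Int × Char)) :
    ∀ u r K i, r < i → fixGo L u r K i = L.foldl pmF u := by
  induction L with
  | nil => intro u r K i _; rfl
  | cons p rest ih =>
    intro u r K i h
    obtain ⟨c, e⟩ := p
    simp only [fixGo, if_neg (by omega : ¬ i = r), List.foldl_cons]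
    exact ih _ r K (i + 1) (by omega)

theorem fixGo_consume (L : List (Int × Char)) :
    ∀ u K i, fixGo L u i K i = (consume K L).foldl pmF u := by
  induction L with
  | nil => intro u K i; rfl
  | cons p rest ih =>
    intro u K i
    obtain ⟨c, e⟩ := p
    simp only [fixGo]
    rw [if_pos trivial]
    by_cases h1 : K - c > 0
    · have hc : consume K ((c, e) :: rest) = consume (K - c) rest := by
        simp only [consume]; rw [if_pos h1]
      rw [if_pos h1, ih u (K - c) (i + 1), hc]
    · by_cases h2 : K - c < 0
      · have hc : consume K ((c, e) :: rest) = (c - K, e) :: rest := by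
          simp only [consume]; rw [if_neg h1, if_pos h2]
        have hn : -(K - c) = c - K := by ring
        rw [if_neg h1, if_pos h2, fixGo_post rest _ i _ (i + 1) (by omega), hc, hn,
          List.foldl_cons]
        rfl
      · have hc : consume K ((c, e) :: rest) = rest := by
          simp only [consume]; rw [if_neg h1, if_neg h2]
        rw [if_neg h1, if_neg h2, fixGo_post rest _ i _ (i + 1) (by omega), hc]

theorem fixCompressed_eq (runs : List (Int × Char)) (idx : Nat) (K : Int)
    (hok : AdjOk runs) (hidx : idx ≤ runs.length) :
    fixCompressed runs idx K = (consume K (runs.drop idx)).foldl pmF (runs.take idx) := by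
  unfold fixCompressed
  conv_lhs => rw [← List.take_append_drop idx runs]
  rw [fixGo_pre (runs.take idx) (runs.drop idx) [] idx K 0
    (by simp [List.length_take])]
  rw [foldl_pmF_no_merge _ [] (hok.take idx) (by simp)]
  rw [List.nil_append]
  have hlen : 0 + (runs.take idx).length = idx := by simp [List.length_take]; omega
  rw [hlen, fixGo_consume]

theorem consumeGo_spec (L : List (Int × Char)) :
    ∀ j k, j ≤ (consumeGo L j k).1 ∧ (consumeGo L j k).1 ≤ j + L.length ∧
      consume k L = cFinish (L.drop ((consumeGo L j k).1 - j)) (consumeGo L j k).2 := by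
  induction L with
  | nil => intro j k; exact ⟨Nat.le_refl j, by simp [consumeGo], by simp [consume, cFinish]⟩
  | cons p rest ih =>
    intro j k
    obtain ⟨c, e⟩ := p
    by_cases h1 : k - c > 0
    · have hgo : consumeGo ((c, e) :: rest) j k = consumeGo rest (j + 1) (k - c) := by
        simp only [consumeGo]; rw [if_pos h1]
      obtain ⟨ha, hb, hc⟩ := ih (j + 1) (k - c)
      rw [hgo]
      refine ⟨by omega, by simp only [List.length_cons]; omega, ?_⟩
      have hd : (consumeGo rest (j + 1) (k - c)).1 - j
          = ((consumeGo rest (j + 1) (k - c)).1 - (j + 1)) + 1 := by omega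
      rw [hd]
      simp only [consume, if_pos h1, List.drop_succ_cons]
      exact hc
    · have hgo : consumeGo ((c, e) :: rest) j k = (j, k) := by
        simp only [consumeGo]; rw [if_neg h1]
      rw [hgo]
      refine ⟨Nat.le_refl j, by simp, ?_⟩
      have hx : ¬ c < k := by omega
      simp [consume, cFinish, hx]

theorem lengthCompressed_go (L : List (Int × Char)) :
    ∀ a : Int, L.foldl (fun acc p => acc + 1 + (if p.1 > 1 then pvDig p.1 else 0)) a
      = a + (L.map (fun p => fB p.1)).sum := by
  induction L with
  | nil => intro a; simp
  | cons p rest ih =>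
    intro a
    rw [List.foldl_cons, ih]
    simp only [List.map_cons, List.sum_cons, fB, pvDig, pvDig]
    ring

theorem lengthCompressed_eq_sum (L : List (Int × Char)) :
    lengthCompressed L = (L.map (fun p => fB p.1)).sum := by
  simpa using lengthCompressed_go L 0

theorem prefLens_getD (runs : List (Int × Char)) :
    ∀ i, i ≤ runs.length →
      (prefLens runs).getD i 0 = ((runs.take i).map (fun p => fB p.1)).sum := by
  have gen : ∀ (L : List (Int × Char)) (a : Int) (i : Nat), i ≤ L.length →
      (L.scanl (fun x p => x + fB p.1) a).getD i 0 = a + ((L.take i).map (fun p => fB p.1)).sum := by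
    intro L
    induction L with
    | nil =>
      intro a i hi
      simp only [List.length_nil, Nat.le_zero] at hi; subst hi; simp [List.scanl]
    | cons p rest ih =>
      intro a i hi
      cases i with
      | zero => simp [List.scanl]
      | succ n =>
        rw [List.scanl_cons, List.getD_cons_succ, ih _ n (by simpa using hi)]
        simp only [List.take_succ_cons, List.map_cons, List.sum_cons]
        ring
  intro i hi
  simpa using gen runs 0 i hi

theorem map_sum_drop (runs : List (Int × Char)) (i : Nat) :
    ((runs.drop i).map (fun p => fB p.1)).sum
      = (runs.map (fun p => fB p.1)).sum - ((runs.take i).map (fun p => fB p.1)).sum := by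
  have h : ((runs.take i).map (fun p => fB p.1)).sum + ((runs.drop i).map (fun p => fB p.1)).sum
      = (runs.map (fun p => fB p.1)).sum := by
    rw [← List.sum_append, ← List.map_append, List.take_append_drop]
  omega

theorem lenC_boundary (runs : List (Int × Char)) (idx rest : Nat) (kc : Int) (ke : Char)
    (hidx : idx ≤ runs.length) (hrest : rest ≤ runs.length)
    (hM : List.IsChain (fun p q => p.2 ≠ q.2) ((kc, ke) :: runs.drop rest)) :
    lengthCompressed (((kc, ke) :: runs.drop rest).foldl pmF (runs.take idx))
      = if 0 < idx ∧ (runs.getD (idx - 1) (0, ' ')).2 = ke then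
          (prefLens runs).getD (idx - 1) 0 + fB ((runs.getD (idx - 1) (0, ' ')).1 + kc)
            + ((prefLens runs).getD runs.length 0 - (prefLens runs).getD rest 0)
        else (prefLens runs).getD idx 0 + fB kc
            + ((prefLens runs).getD runs.length 0 - (prefLens runs).getD rest 0) := by
  have hTot : (prefLens runs).getD runs.length 0 = (runs.map (fun p => fB p.1)).sum := by
    rw [prefLens_getD runs _ (Nat.le_refl _), List.take_length]
  by_cases hc : 0 < idx ∧ (runs.getD (idx - 1) (0, ' ')).2 = ke
  · obtain ⟨hpos, heq⟩ := hc
    have hlt : idx - 1 < runs.length := by omega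
    have hgd : runs.getD (idx - 1) (0, ' ') = runs[idx - 1] := List.getD_eq_getElem _ _ hlt
    have hpair : runs[idx - 1] = (runs[idx - 1].1, ke) := by
      rw [Prod.ext_iff]
      exact ⟨rfl, by rw [← hgd, heq]⟩
    have htake : runs.take idx = runs.take (idx - 1) ++ [(runs[idx - 1].1, ke)] := by
      have h1 : idx = (idx - 1) + 1 := by omega
      conv_lhs => rw [h1]
      rw [List.take_succ_eq_append_getElem hlt]
      exact congrArg (fun p => runs.take (idx - 1) ++ [p]) hpair
    rw [if_pos ⟨hpos, heq⟩, htake, foldl_pmF_merge _ _ _ _ _ hM]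
    rw [lengthCompressed_eq_sum]
    simp only [List.map_append, List.sum_append, List.map_cons, List.sum_cons,
      List.map_nil, List.sum_nil]
    rw [prefLens_getD runs (idx - 1) (by omega), prefLens_getD runs rest hrest,
      map_sum_drop, hTot, hgd]
    ring
  · rw [if_neg hc]
    have hnm : ((kc, ke) :: runs.drop rest).foldl pmF (runs.take idx)
        = runs.take idx ++ ((kc, ke) :: runs.drop rest) := by
      apply foldl_pmF_no_merge _ _ hM
      intro a ha b hb
      simp only [List.head?_cons, Option.mem_def, Option.some.injEq] at hb
      subst hb
      rcases Nat.eq_zero_or_pos idx with h0 | h0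
      · subst h0; simp at ha
      · have hlt : idx - 1 < runs.length := by omega
        have htake : runs.take idx = runs.take (idx - 1) ++ [runs[idx - 1]] := by
          have h1 : idx = (idx - 1) + 1 := by omega
          conv_lhs => rw [h1]
          rw [List.take_succ_eq_append_getElem hlt]
        rw [htake, List.getLast?_concat] at ha
        simp only [Option.mem_def, Option.some.injEq] at ha
        subst ha
        intro hcontra
        exact hc ⟨h0, by rw [List.getD_eq_getElem _ _ hlt, hcontra]⟩
    rw [hnm, lengthCompressed_eq_sum]
    simp only [List.map_append, List.sum_append, List.map_cons, List.sum_cons]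
    rw [prefLens_getD runs idx hidx, prefLens_getD runs rest hrest, map_sum_drop, hTot]
    ring

theorem lss_eq (runs : List (Int × Char)) (K : Int) (idx : Nat)
    (hok : AdjOk runs) (hidx : idx < runs.length) :
    lengthCompressed (fixCompressed runs idx K)
      = (let jk := consumeGo (runs.drop idx) idx K
         if jk.1 = runs.length then (prefLens runs).getD idx 0
         else
           let rj := runs.getD jk.1 (0, ' ')
           let rem := rj.1 - jk.2
           let keptRest : Option (Int × Char) × Nat :=
             if rem > 0 then (some (rem, rj.2), jk.1 + 1)
             else if jk.1 + 1 < runs.length then (some (runs.getD (jk.1 + 1) (0, ' ')), jk.1 + 2)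
             else (none, jk.1 + 1)
           let suffix := (prefLens runs).getD runs.length 0 - (prefLens runs).getD keptRest.2 0
           match keptRest.1 with
           | none => (prefLens runs).getD idx 0
           | some kp =>
             if 0 < idx ∧ (runs.getD (idx - 1) (0, ' ')).2 = kp.2 then
               (prefLens runs).getD (idx - 1) 0 + fB ((runs.getD (idx - 1) (0, ' ')).1 + kp.1) + suffix
             else (prefLens runs).getD idx 0 + fB kp.1 + suffix) := by
  obtain ⟨hj1, hj2', hcons⟩ := consumeGo_spec (runs.drop idx) idx K
  have hj2 : (consumeGo (runs.drop idx) idx K).1 ≤ runs.length := by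
    simp only [List.length_drop] at hj2'; omega
  have hdd : (runs.drop idx).drop ((consumeGo (runs.drop idx) idx K).1 - idx)
      = runs.drop (consumeGo (runs.drop idx) idx K).1 := by
    rw [List.drop_drop]; congr 1; omega
  have hfix : lengthCompressed (fixCompressed runs idx K)
      = lengthCompressed ((cFinish (runs.drop (consumeGo (runs.drop idx) idx K).1)
          (consumeGo (runs.drop idx) idx K).2).foldl pmF (runs.take idx)) := by
    rw [fixCompressed_eq runs idx K hok (le_of_lt hidx), hcons, hdd]
  rw [hfix]
  simp only [gt_iff_lt]
  set j := (consumeGo (runs.drop idx) idx K).1 with hjdef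
  set k2 := (consumeGo (runs.drop idx) idx K).2 with hk2def
  by_cases hn : j = runs.length
  · have h0 : runs.drop j = [] := by rw [hn, List.drop_length]
    rw [h0]
    simp only [cFinish, List.foldl_nil, hn, if_true]
    rw [lengthCompressed_eq_sum, prefLens_getD runs idx (le_of_lt hidx)]
  · have hjlt : j < runs.length := lt_of_le_of_ne hj2 hn
    have hdropj : runs.drop j = runs[j] :: runs.drop (j + 1) := List.drop_eq_getElem_cons hjlt
    have hgdj : runs.getD j (0, ' ') = runs[j] := List.getD_eq_getElem _ _ hjlt
    rw [hdropj, hgdj]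
    simp only [cFinish, if_neg hn]
    simp only [List.get_eq_getElem]
    have hch := hok.drop j
    rw [hdropj, List.isChain_cons] at hch
    by_cases hr : 0 < runs[j].1 - k2
    · rw [if_pos (by omega : k2 - runs[j].1 < 0), if_pos hr]
      have hM : List.IsChain (fun p q => p.2 ≠ q.2)
          ((runs[j].1 - k2, runs[j].2) :: runs.drop (j + 1)) :=
        List.isChain_cons.mpr ⟨fun y hy => hch.1 y hy, hch.2⟩
      exact lenC_boundary runs idx (j + 1) (runs[j].1 - k2) (runs[j].2)
        (le_of_lt hidx) (by omega) hM
    · rw [if_neg (by omega : ¬ k2 - runs[j].1 < 0), if_neg hr]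
      by_cases hq : j + 1 < runs.length
      · rw [if_pos hq, List.getD_eq_getElem _ _ hq]
        have hdropj1 : runs.drop (j + 1) = runs[j + 1] :: runs.drop (j + 2) :=
          List.drop_eq_getElem_cons hq
        rw [hdropj1]
        have hch2 := hok.drop (j + 1)
        rw [hdropj1] at hch2
        exact lenC_boundary runs idx (j + 2) (runs[j + 1].1) (runs[j + 1].2)
          (le_of_lt hidx) (by omega) hch2
      · rw [if_neg hq]
        have h0 : runs.drop (j + 1) = [] := List.drop_eq_nil_of_le (by omega)
        rw [h0]
        simp only [List.foldl_nil]
        rw [lengthCompressed_eq_sum, prefLens_getD runs idx (le_of_lt hidx)]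

theorem solGo_eq (runs : List (Int × Char)) (K : Int) (hok : AdjOk runs) :
    ∀ t idx sh, runs.drop idx = t →
    solGoA runs K t idx sh
      = solGoB runs (prefLens runs) ((prefLens runs).getD runs.length 0) K t idx sh := by
  intro t
  induction t with
  | nil => intro idx sh _; rfl
  | cons p t' ih =>
    intro idx sh hdrop
    obtain ⟨cnt, ch⟩ := p
    have hidx : idx < runs.length := by
      by_contra hge
      rw [List.drop_eq_nil_of_le (by omega)] at hdrop
      exact (List.cons_ne_nil _ _) hdrop.symm
    have hdrop' : runs.drop (idx + 1) = t' := by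
      have h1 : (runs.drop idx).drop 1 = runs.drop (idx + 1) := by rw [List.drop_drop]
      rw [← h1, hdrop]
      rfl
    simp only [solGoA, solGoB]
    by_cases hcand : cnt ≤ K ∨ pvDig cnt > pvDig (cnt - K)
    · rw [if_neg (not_not_intro hcand), if_pos hcand, lss_eq runs K idx hok hidx]
      exact ih (idx + 1) _ hdrop'
    · rw [if_pos hcand, if_neg hcand]
      exact ih (idx + 1) sh hdrop'

-- ===== VERDICT (by name: the statement is the Claim_ definition above) =====
theorem solution_spec : Claim_equal_solution := by
  intro S K _ hpre
  unfold Spec_solution solution solution_alt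
  have hne : S.toList ≠ [] := fun h => hpre (String.toList_eq_nil_iff.mp h)
  rw [compress_eq_runsOf _ hne]
  exact solGo_eq (runsOf S.toList) K (adjOk_runsOf _) _ 0 _ rfl
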